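-- pv_equiv track=rewrite | github.com/algorhythmic/projectnexus | nexus/adapters/polymarket.py | _categorize_from_title
-- ===== SOURCE A (Python) =====
-- def _categorize_from_title(title: str) -> str:
--     """Categorize a market based on title keywords."""
--     t = title.lower()
--     if any(w in t for w in ("election", "president", "congress", "senate", "vote", "poll")):
--         return "Politics"
--     if any(w in t for w in ("bitcoin", "crypto", "ethereum", "btc", "eth")):
--         return "Cryptocurrency"
--     if any(w in t for w in ("gdp", "inflation", "fed", "economy", "unemployment", "interest rate")):
--         return "Economics"
--     if any(w in t for w in ("nfl", "nba", "mlb", "nhl", "super bowl", "world cup")):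
--         return "Sports"
--     if any(w in t for w in ("temperature", "weather", "hurricane", "rain")):
--         return "Weather"
--     if any(w in t for w in ("movie", "oscar", "emmy", "celebrity")):
--         return "Entertainment"
--     if any(w in t for w in ("stock", "company", "ipo", "earnings")):
--         return "Business"
--     return "Other"
-- ===== SOURCE B (Python) =====
-- _GROUPS = [
--     (("election", "president", "congress", "senate", "vote", "poll"), "Politics"),
--     (("bitcoin", "crypto", "ethereum", "btc", "eth"), "Cryptocurrency"),
--     (("gdp", "inflation", "fed", "economy", "unemployment", "interest rate"), "Economics"),
--     (("nfl", "nba", "mlb", "nhl", "super bowl", "world cup"), "Sports"),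
--     (("temperature", "weather", "hurricane", "rain"), "Weather"),
--     (("movie", "oscar", "emmy", "celebrity"), "Entertainment"),
--     (("stock", "company", "ipo", "earnings"), "Business"),
-- ]
--
-- # flat keyword -> (category, rank) index, built once at import time
-- _KEYMAP = [(w, cat, rank) for rank, (words, cat) in enumerate(_GROUPS) for w in words]
--
--
-- def _categorize_from_title(title: str) -> str:
--     """Categorize a market based on title keywords."""
--     t = title.lower()
--     best_rank = len(_GROUPS)
--     best = "Other"
--     for w, cat, rank in _KEYMAP:
--         if w in t and rank < best_rank:
--             best_rank = rank
--             best = cat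
--     return best
-- ===== Notes on version B (the rewrite author's own statement) =====
-- stated objective: alternative
-- what changed: Replaces the ordered early-exit cascade of per-category any() tests by a precomputed flat keyword->(category, rank) index scanned in one loop that keeps the best (lowest) rank seen, returning 'Other' if nothing matched.
import Mathlib
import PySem

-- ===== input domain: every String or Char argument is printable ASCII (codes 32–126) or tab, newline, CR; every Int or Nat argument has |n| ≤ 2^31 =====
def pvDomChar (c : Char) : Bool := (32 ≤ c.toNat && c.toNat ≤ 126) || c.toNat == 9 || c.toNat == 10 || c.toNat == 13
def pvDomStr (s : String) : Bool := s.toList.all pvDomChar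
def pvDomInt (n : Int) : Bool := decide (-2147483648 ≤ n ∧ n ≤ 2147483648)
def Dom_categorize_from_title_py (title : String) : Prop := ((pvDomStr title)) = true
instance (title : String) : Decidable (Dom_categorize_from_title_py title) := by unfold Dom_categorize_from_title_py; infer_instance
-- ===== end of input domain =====

-- B replaces A's ordered cascade of any() tests by one pass over a flat keyword→(category, rank)
-- index, keeping the best (lowest) rank seen; objective: alternative decomposition, same cost.

-- ===== PORT A =====
def categorize_from_title_py (title : String) : String :=
  let t := PySem.Str.lower title
  if (["election", "president", "congress", "senate", "vote", "poll"].any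
      (fun w => PySem.Str.isIn w t)) then "Politics"
  else if (["bitcoin", "crypto", "ethereum", "btc", "eth"].any
      (fun w => PySem.Str.isIn w t)) then "Cryptocurrency"
  else if (["gdp", "inflation", "fed", "economy", "unemployment", "interest rate"].any
      (fun w => PySem.Str.isIn w t)) then "Economics"
  else if (["nfl", "nba", "mlb", "nhl", "super bowl", "world cup"].any
      (fun w => PySem.Str.isIn w t)) then "Sports"
  else if (["temperature", "weather", "hurricane", "rain"].any
      (fun w => PySem.Str.isIn w t)) then "Weather"
  else if (["movie", "oscar", "emmy", "celebrity"].any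
      (fun w => PySem.Str.isIn w t)) then "Entertainment"
  else if (["stock", "company", "ipo", "earnings"].any
      (fun w => PySem.Str.isIn w t)) then "Business"
  else "Other"

-- ===== PORT B =====
-- _GROUPS (Source B)
def pvGroupsB : List (List String × String) :=
  [(["election", "president", "congress", "senate", "vote", "poll"], "Politics"),
   (["bitcoin", "crypto", "ethereum", "btc", "eth"], "Cryptocurrency"),
   (["gdp", "inflation", "fed", "economy", "unemployment", "interest rate"], "Economics"),
   (["nfl", "nba", "mlb", "nhl", "super bowl", "world cup"], "Sports"),
   (["temperature", "weather", "hurricane", "rain"], "Weather"),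
   (["movie", "oscar", "emmy", "celebrity"], "Entertainment"),
   (["stock", "company", "ipo", "earnings"], "Business")]

-- _KEYMAP (Source B): [(w, cat, rank) for rank, (words, cat) in enumerate(_GROUPS) for w in words]
def pvKeymapB : List (String × String × Int) :=
  (PySem.List.enumerate pvGroupsB).flatMap
    (fun rc => rc.2.1.map (fun w => (w, rc.2.2, rc.1)))

def categorize_from_title_py_alt (title : String) : String :=
  let t := PySem.Str.lower title
  let res := pvKeymapB.foldl
    (fun (best : Int × String) (e : String × String × Int) =>
      if PySem.Str.isIn e.1 t && decide (e.2.2 < best.1) then (e.2.2, e.2.1) else best)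
    ((pvGroupsB.length : Int), "Other")
  res.2

-- ===== PRECONDITION & SPEC =====
def Spec_categorize_from_title_py (title : String) (out : String) : Prop := out = categorize_from_title_py_alt title
instance (title : String) (out : String) : Decidable (Spec_categorize_from_title_py title out) := by unfold Spec_categorize_from_title_py; infer_instance

-- ===== CLAIM (what is proved, stated in full; the proofs are below) =====
def Claim_equal_categorize_from_title_py : Prop := ∀ (title : String), Dom_categorize_from_title_py title → Spec_categorize_from_title_py title (categorize_from_title_py title)

-- ===== LEMMAS AND PROOFS =====

-- B's loop body as a named step function
def pvStep (t : String) (best : Int × String) (e : String × String × Int) : Int × String :=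
  if PySem.Str.isIn e.1 t && decide (e.2.2 < best.1) then (e.2.2, e.2.1) else best

-- the flat index of a tail of the group list, ranks starting at k
def pvFlat (k : Int) : List (List String × String) → List (String × String × Int)
  | [] => []
  | (ws, c) :: gs => ws.map (fun w => (w, c, k)) ++ pvFlat (k + 1) gs

-- A's cascade over a tail of the group list
def pvCascade (t : String) : List (List String × String) → String
  | [] => "Other"
  | (ws, c) :: gs => if ws.any (fun w => PySem.Str.isIn w t) then c else pvCascade t gs

theorem pvFlat_rank_ge (gs : List (List String × String)) (k : Int)
    (e : String × String × Int) (he : e ∈ pvFlat k gs) : k ≤ e.2.2 := by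
  induction gs generalizing k with
  | nil => simp [pvFlat] at he
  | cons g gs ih =>
    obtain ⟨ws, c⟩ := g
    simp only [pvFlat, List.mem_append, List.mem_map] at he
    rcases he with ⟨w, _, rfl⟩ | he
    · simp
    · have := ih (k + 1) he; omega

theorem pvFoldl_fix (t : String) (l : List (String × String × Int)) (s : Int × String)
    (h : ∀ e ∈ l, PySem.Str.isIn e.1 t = false ∨ s.1 ≤ e.2.2) :
    l.foldl (pvStep t) s = s := by
  induction l with
  | nil => rfl
  | cons e l ih =>
    have hs : pvStep t s e = s := by
      unfold pvStep
      rcases h e (by simp) with hf | hle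
      · rw [hf]; simp
      · have hn : ¬ (e.2.2 < s.1) := by omega
        simp [hn]
    rw [List.foldl_cons, hs]
    exact ih (fun e' he' => h e' (by simp [he']))

theorem pvFoldl_hit (t : String) (c : String) (k : Int) (ws : List String) (s : Int × String)
    (hany : ws.any (fun w => PySem.Str.isIn w t) = true) (hk : k < s.1) :
    (ws.map (fun w => (w, c, k))).foldl (pvStep t) s = (k, c) := by
  induction ws generalizing s with
  | nil => simp at hany
  | cons w ws ih =>
    simp only [List.map_cons, List.foldl_cons]
    by_cases hw : PySem.Str.isIn w t = true
    · have hstep : pvStep t s (w, c, k) = (k, c) := by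
        unfold pvStep; rw [hw]; simp [hk]
      rw [hstep]
      exact pvFoldl_fix t _ _ (fun e he => by
        rcases List.mem_map.mp he with ⟨w', _, rfl⟩
        right; simp)
    · have hstep : pvStep t s (w, c, k) = s := by
        unfold pvStep; rw [eq_false_of_ne_true hw]; simp
      rw [hstep]
      have hany' : ws.any (fun w => PySem.Str.isIn w t) = true := by
        simp only [List.any_cons, eq_false_of_ne_true hw, Bool.false_or] at hany
        exact hany
      exact ih s hany' hk

theorem pvMain (t : String) (gs : List (List String × String)) (k : Int) :
    ((pvFlat k gs).foldl (pvStep t) (k + (gs.length : Int), "Other")).2 = pvCascade t gs := by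
  induction gs generalizing k with
  | nil =>
    simp [pvFlat, pvCascade]
  | cons g gs ih =>
    obtain ⟨ws, c⟩ := g
    simp only [pvFlat, pvCascade, List.foldl_append, List.length_cons]
    by_cases hany : ws.any (fun w => PySem.Str.isIn w t) = true
    · rw [pvFoldl_hit t c k ws _ hany (by push_cast; omega)]
      rw [pvFoldl_fix t _ _ (fun e he => Or.inr (by
        have := pvFlat_rank_ge gs (k + 1) e he; omega))]
      rw [if_pos hany]
    · have hinner : (ws.map (fun w => (w, c, k))).foldl (pvStep t)
          (k + ((gs.length + 1 : Nat) : Int), "Other") = (k + ((gs.length + 1 : Nat) : Int), "Other") :=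
        pvFoldl_fix t _ _ (fun e he => by
          rcases List.mem_map.mp he with ⟨w, hw, rfl⟩
          left
          by_contra hne
          refine hany (List.any_eq_true.mpr ⟨w, hw, ?_⟩)
          cases h : PySem.Str.isIn w t with
          | true => rfl
          | false => exact absurd h hne)
      rw [hinner]
      have hc : k + ((gs.length + 1 : Nat) : Int) = (k + 1) + (gs.length : Int) := by
        push_cast; ring
      rw [hc, ih (k + 1), if_neg hany]

theorem pvAlt_eq (title : String) :
    categorize_from_title_py_alt title =
      ((pvFlat 0 pvGroupsB).foldl (pvStep (PySem.Str.lower title))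
        ((pvGroupsB.length : Int), "Other")).2 := rfl

theorem pvA_eq (title : String) :
    categorize_from_title_py title = pvCascade (PySem.Str.lower title) pvGroupsB := rfl

-- ===== VERDICT (by name: the statement is the Claim_ definition above) =====
theorem categorize_from_title_py_spec : Claim_equal_categorize_from_title_py := by
  intro title _
  unfold Spec_categorize_from_title_py
  have h := pvMain (PySem.Str.lower title) pvGroupsB 0
  rw [zero_add] at h
  rw [pvAlt_eq, h, pvA_eq]
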